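-- pv_equiv track=rewrite | github.com/atteahma/bubble-sort-game-solver | utils.py | index_to_ij
-- ===== SOURCE A (Python) =====
-- def index_to_ij(index, grid_widths):
--     i = 1
--     for width in grid_widths:
--         if index < width:
--             return i, index + 1
--         index -= width
--         i += 1
--     return None, None
-- ===== SOURCE B (Python) =====
-- from itertools import accumulate
--
-- def index_to_ij(index, grid_widths):
--     cum = list(accumulate(grid_widths))
--     j = next((k for k, c in enumerate(cum) if index < c), None)
--     if j is None:
--         return None, None
--     return j + 1, index - (cum[j - 1] if j else 0) + 1
-- ===== Notes on version B (the rewrite author's own statement) =====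
-- stated objective: alternative
-- what changed: Replaces the mutating subtract-and-scan (decrementing index row by row) with a precomputed prefix-sum table of row boundaries: the row is the first boundary exceeding the original index, the column is the offset from the previous boundary.
import Mathlib
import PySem

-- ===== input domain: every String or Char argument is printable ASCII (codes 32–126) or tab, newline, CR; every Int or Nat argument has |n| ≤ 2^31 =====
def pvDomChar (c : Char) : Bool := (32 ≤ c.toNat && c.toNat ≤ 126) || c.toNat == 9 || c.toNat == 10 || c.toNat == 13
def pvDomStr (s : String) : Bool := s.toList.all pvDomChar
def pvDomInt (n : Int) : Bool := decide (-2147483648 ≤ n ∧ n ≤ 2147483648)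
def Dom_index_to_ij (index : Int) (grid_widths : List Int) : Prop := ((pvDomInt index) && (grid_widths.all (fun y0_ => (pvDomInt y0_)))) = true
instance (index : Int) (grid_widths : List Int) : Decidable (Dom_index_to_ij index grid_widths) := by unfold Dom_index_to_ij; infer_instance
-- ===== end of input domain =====

-- B replaces A's mutating subtract-and-scan by a prefix-sum boundary table plus a first-crossing search (alternative decomposition, same cost).


-- ===== PORT A =====
-- A's loop: mutate index (index -= width) and counter i; return on the first row with index < width.
def indexToIjGo (index : Int) (i : Int) : List Int → Option Int × Option Int
  | [] => (none, none)
  | w :: ws => if index < w then (some i, some (index + 1)) else indexToIjGo (index - w) (i + 1) ws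

def index_to_ij (index : Int) (grid_widths : List Int) : Option Int × Option Int :=
  indexToIjGo index 1 grid_widths

-- ===== PORT B =====
-- itertools.accumulate
def cumAux (s : Int) : List Int → List Int
  | [] => []
  | w :: ws => (s + w) :: cumAux (s + w) ws

-- next((k for k, c in enumerate(cum) if index < c), None)
def findIdxAux (index : Int) (k : Nat) : List Int → Option Nat
  | [] => none
  | c :: cs => if index < c then some k else findIdxAux index (k + 1) cs

def index_to_ij_alt (index : Int) (grid_widths : List Int) : Option Int × Option Int :=
  let cum := cumAux 0 grid_widths
  match findIdxAux index 0 cum with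
  | none => (none, none)
  | some j => (some ((j : Int) + 1), some (index - (if j = 0 then 0 else cum.getD (j - 1) 0) + 1))

-- ===== PRECONDITION & SPEC =====
def Spec_index_to_ij (index : Int) (grid_widths : List Int) (out : Option Int × Option Int) : Prop := out = index_to_ij_alt index grid_widths
instance (index : Int) (grid_widths : List Int) (out : Option Int × Option Int) : Decidable (Spec_index_to_ij index grid_widths out) := by unfold Spec_index_to_ij; infer_instance

-- ===== CLAIM (what is proved, stated in full; the proofs are below) =====
def Claim_equal_index_to_ij : Prop := ∀ (index : Int) (grid_widths : List Int), Dom_index_to_ij index grid_widths → Spec_index_to_ij index grid_widths (index_to_ij index grid_widths)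

-- ===== LEMMAS AND PROOFS =====
theorem findIdxAux_shift (idx : Int) : ∀ (cs : List Int) (k : Nat),
    findIdxAux idx (k + 1) cs = (findIdxAux idx k cs).map (· + 1) := by
  intro cs
  induction cs with
  | nil => intro k; simp [findIdxAux]
  | cons c cs ih =>
    intro k
    by_cases h : idx < c
    · simp [findIdxAux, h]
    · simp [findIdxAux, h, ih]

theorem go_eq_alt (idx : Int) : ∀ (ws : List Int) (s i : Int),
    indexToIjGo (idx - s) i ws =
      (match findIdxAux idx 0 (cumAux s ws) with
       | none => (none, none)
       | some j => (some (i + (j : Int)),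
           some (idx - (if j = 0 then s else (cumAux s ws).getD (j - 1) 0) + 1))) := by
  intro ws
  induction ws with
  | nil => intro s i; simp [indexToIjGo, cumAux, findIdxAux]
  | cons w ws ih =>
    intro s i
    by_cases h : idx < s + w
    · have h' : idx - s < w := by omega
      simp [indexToIjGo, cumAux, findIdxAux, h, h']
    · have h' : ¬ idx - s < w := by omega
      have hsub : idx - s - w = idx - (s + w) := by omega
      simp only [indexToIjGo, cumAux, findIdxAux, if_neg h, if_neg h', hsub]
      rw [ih (s + w) (i + 1), findIdxAux_shift]
      cases hf : findIdxAux idx 0 (cumAux (s + w) ws) with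
      | none => simp
      | some j =>
        cases j with
        | zero => simp
        | succ j' =>
          simp
          ring

-- ===== VERDICT (by name: the statement is the Claim_ definition above) =====
theorem index_to_ij_spec : Claim_equal_index_to_ij := by
  intro index grid_widths _
  unfold Spec_index_to_ij index_to_ij index_to_ij_alt
  have := go_eq_alt index grid_widths 0 1
  rw [show index - 0 = index by omega] at this
  rw [this]
  cases hf : findIdxAux index 0 (cumAux 0 grid_widths) with
  | none => simp [hf]
  | some j => simp [hf, Int.add_comm]
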